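-- pv_equiv track=rewrite | github.com/jassimshanavaskhan/prpl_ai | EnhancedCodeParserClass.py | get_context_struct
-- ===== SOURCE A (Python) =====
-- from typing import Dict, List, Set, Any, Optional, Tuple
--
-- def get_context_struct(content: str, start_pos: int, end_pos: int, context_lines: int = 3) -> Tuple[str, str]:
--     """Get the context before and after a code segment."""
--     # Find line boundaries
--     line_start = content.rfind('\n', 0, start_pos) + 1
--     if line_start == 0:
--         line_start = 0
--
--     line_end = content.find('\n', end_pos)
--     if line_end == -1:
--         line_end = len(content)
--
--     # Get context before
--     context_start = content.rfind('\n', 0, line_start)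
--     for _ in range(context_lines - 1):
--         prev_start = content.rfind('\n', 0, context_start)
--         if prev_start == -1:
--             break
--         context_start = prev_start
--     if context_start == -1:
--         context_start = 0
--
--     # Get context after
--     context_end = line_end
--     for _ in range(context_lines):
--         next_end = content.find('\n', context_end + 1)
--         if next_end == -1:
--             context_end = len(content)
--             break
--         context_end = next_end
--
--     return content[context_start:line_start].strip(), content[line_end:context_end].strip()
-- ===== SOURCE B (Python) =====
-- def get_context_struct(content, start_pos, end_pos, context_lines=3):
--     """Get the context before and after a code segment."""
--     lines = content.split('\n')
--     start_line = content[:start_pos].count('\n')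
--     end_line = content[:end_pos].count('\n')
--     # up to context_lines - 1 lines preceding the start line (never reaching back
--     # to the first line of the file), and up to context_lines lines following the end line
--     before = '\n'.join(lines[max(1, start_line - context_lines + 1):start_line]).strip()
--     after = '\n'.join(lines[end_line + 1:end_line + 1 + context_lines]).strip()
--     return before, after
-- ===== Notes on version B (the rewrite author's own statement) =====
-- stated objective: simpler
-- what changed: B splits the content into its list of lines once and takes the context windows by slicing that list (locating the start/end lines by counting newlines before each position), instead of A's repeated rfind/find character scans with mutable boundary loops; Pre_ excludes negative context_lines, a malformed count outside the natural domain, where B's negative slice bounds would index the line list from the end.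
-- outside the precondition, e.g. on get_context_struct('a\nb\nc\nd', 2, 2, -3): A returns ('', ''), B returns ('', 'c')
import Mathlib
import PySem

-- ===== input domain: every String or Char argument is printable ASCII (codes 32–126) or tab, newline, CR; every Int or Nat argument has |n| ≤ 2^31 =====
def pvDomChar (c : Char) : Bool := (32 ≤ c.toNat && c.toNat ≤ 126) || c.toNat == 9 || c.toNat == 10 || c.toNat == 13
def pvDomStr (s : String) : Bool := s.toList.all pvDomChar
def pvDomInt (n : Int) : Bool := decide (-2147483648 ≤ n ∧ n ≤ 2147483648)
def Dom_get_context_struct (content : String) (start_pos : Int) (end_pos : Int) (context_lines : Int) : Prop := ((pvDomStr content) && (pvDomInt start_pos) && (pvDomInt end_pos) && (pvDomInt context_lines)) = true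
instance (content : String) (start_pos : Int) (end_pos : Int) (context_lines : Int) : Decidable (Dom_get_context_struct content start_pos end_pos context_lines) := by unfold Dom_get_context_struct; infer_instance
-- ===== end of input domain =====

-- B splits the content into its lines once and slices that list instead of A's repeated
-- rfind/find boundary-scanning loops; same return value on the stated domain (simpler structure).
-- ===== PORT A =====
def pvBeforeLoop (content : String) : Nat → Int → Int
  | 0, cs => cs
  | k+1, cs =>
    let prev := PySem.Str.rfindFrom content "\n" 0 (some cs)
    if prev = -1 then cs else pvBeforeLoop content k prev

def pvAfterLoop (content : String) : Nat → Int → Int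
  | 0, ce => ce
  | k+1, ce =>
    let next := PySem.Str.findFrom content "\n" (ce + 1) none
    if next = -1 then PySem.Str.len content else pvAfterLoop content k next

def get_context_struct (content : String) (start_pos : Int) (end_pos : Int) (context_lines : Int) : String × String :=
  let line_start0 : Int := PySem.Str.rfindFrom content "\n" 0 (some start_pos) + 1
  let line_start : Int := if line_start0 = 0 then 0 else line_start0
  let line_end0 : Int := PySem.Str.findFrom content "\n" end_pos none
  let line_end : Int := if line_end0 = -1 then PySem.Str.len content else line_end0
  let context_start0 : Int := PySem.Str.rfindFrom content "\n" 0 (some line_start)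
  let context_start1 : Int := pvBeforeLoop content (context_lines - 1).toNat context_start0
  let context_start : Int := if context_start1 = -1 then 0 else context_start1
  let context_end : Int := pvAfterLoop content context_lines.toNat line_end
  (PySem.Str.strip (PySem.Str.slice content (some context_start) (some line_start)),
   PySem.Str.strip (PySem.Str.slice content (some line_end) (some context_end)))

-- ===== PORT B =====
def get_context_struct_alt (content : String) (start_pos : Int) (end_pos : Int) (context_lines : Int) : String × String :=
  let lines : List String := (PySem.Str.split? content "\n").getD []
  let start_line : Int := (PySem.Str.count (PySem.Str.slice content none (some start_pos)) "\n" : Int)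
  let end_line : Int := (PySem.Str.count (PySem.Str.slice content none (some end_pos)) "\n" : Int)
  let before : String := PySem.Str.strip (PySem.Str.join "\n"
    (PySem.List.slice lines (some (max 1 (start_line - context_lines + 1))) (some start_line)))
  let after : String := PySem.Str.strip (PySem.Str.join "\n"
    (PySem.List.slice lines (some (end_line + 1)) (some (end_line + 1 + context_lines))))
  (before, after)

-- ===== PRECONDITION & SPEC =====
-- Pre_ excludes negative context_lines (a malformed request outside the natural domain), where
-- B's negative slice bounds would index the line list from the end; A returns normally everywhere.
def Pre_get_context_struct (content : String) (start_pos : Int) (end_pos : Int) (context_lines : Int) : Prop :=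
  0 ≤ context_lines
instance (content : String) (start_pos : Int) (end_pos : Int) (context_lines : Int) : Decidable (Pre_get_context_struct content start_pos end_pos context_lines) := by unfold Pre_get_context_struct; infer_instance

def pvWitness_get_context_struct : String × Int × Int × Int := ("a\nb\nc", 2, 3, 2)

def Spec_get_context_struct (content : String) (start_pos : Int) (end_pos : Int) (context_lines : Int) (out : String × String) : Prop := out = get_context_struct_alt content start_pos end_pos context_lines
instance (content : String) (start_pos : Int) (end_pos : Int) (context_lines : Int) (out : String × String) : Decidable (Spec_get_context_struct content start_pos end_pos context_lines out) := by unfold Spec_get_context_struct; infer_instance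

-- ===== CLAIM (what is proved, stated in full; the proofs are below) =====
def Claim_equal_get_context_struct : Prop := ∀ (content : String) (start_pos : Int) (end_pos : Int) (context_lines : Int), Dom_get_context_struct content start_pos end_pos context_lines → Pre_get_context_struct content start_pos end_pos context_lines → Spec_get_context_struct content start_pos end_pos context_lines (get_context_struct content start_pos end_pos context_lines)

-- ===== LEMMAS AND PROOFS =====
def pvNL (cs : List Char) : List Nat := (List.range cs.length).filter (fun i => cs[i]? == some '\n')

theorem pvNL_mem (cs : List Char) (i : Nat) : i ∈ pvNL cs ↔ i < cs.length ∧ cs[i]? = some '\n' := by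
  simp [pvNL, List.mem_filter]

theorem pvNL_sorted (cs : List Char) : (pvNL cs).Pairwise (· < ·) :=
  List.Pairwise.sublist (List.filter_sublist) (List.pairwise_lt_range)

theorem pvNL_lt_length (cs : List Char) {i : Nat} (h : i ∈ pvNL cs) : i < cs.length :=
  ((pvNL_mem cs i).1 h).1

theorem pvNL_cons (x : Char) (t : List Char) :
    pvNL (x :: t) = (if x = '\n' then [0] else []) ++ (pvNL t).map Nat.succ := by
  unfold pvNL
  rw [List.length_cons, List.range_succ_eq_map, List.filter_cons, List.filter_map]
  have hc : ((fun i => (x :: t)[i]? == some '\n') ∘ Nat.succ) = fun i => t[i]? == some '\n' := by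
    funext i; simp
  rw [hc]
  by_cases hx : x = '\n' <;> simp [hx]

-- strict monotonicity of getElem on a pairwise-< list
theorem pvSorted_getElem_lt {l : List Nat} (hs : l.Pairwise (· < ·)) {i j : Nat}
    (hij : i < j) (hj : j < l.length) : l[i]'(by omega) < l[j] := by
  exact List.pairwise_iff_getElem.1 hs i j (by omega) hj hij

-- rank characterisation: on a sorted list, index j is below the rank of e iff l[j] < e
theorem pvRank_iff {l : List Nat} (hs : l.Pairwise (· < ·)) (e : Nat) {j : Nat}
    (hj : j < l.length) : l[j] < e ↔ j < l.countP (fun i => decide (i < e)) := by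
  induction l generalizing j with
  | nil => simp at hj
  | cons x t ih =>
    rcases List.pairwise_cons.1 hs with ⟨hx, ht⟩
    have hzero : ¬ (x < e) → t.countP (fun i => decide (i < e)) = 0 := by
      intro hlt
      apply List.countP_eq_zero.2
      intro a ha; have := hx a ha; simp; omega
    cases j with
    | zero =>
      simp only [List.getElem_cons_zero, List.countP_cons]
      constructor
      · intro h; simp [h]
      · intro h
        by_contra hlt
        simp [hzero hlt, hlt] at h
    | succ k =>
      simp only [List.getElem_cons_succ, List.countP_cons]
      have hk : k < t.length := by simpa using hj
      have hiff := ih ht hk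
      constructor
      · intro h
        have hx' : x < e := by have := hx (t[k]) (List.getElem_mem hk); omega
        have := hiff.1 h
        simp [hx']; omega
      · intro h
        by_cases hx' : x < e
        · simp [hx'] at h; exact hiff.2 (by omega)
        · simp [hzero hx', hx'] at h

-- rank of l[j] is j
theorem pvRank_self {l : List Nat} (hs : l.Pairwise (· < ·)) {j : Nat} (hj : j < l.length) :
    l.countP (fun i => decide (i < l[j])) = j := by
  have h1 : ¬ (j < l.countP (fun i => decide (i < l[j]))) := by
    intro h; exact absurd ((pvRank_iff hs _ hj).2 h) (lt_irrefl _)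
  by_cases hz : j = 0
  · omega
  · have hj1 : j - 1 < l.length := by omega
    have : l[j-1]'hj1 < l[j] := pvSorted_getElem_lt hs (by omega) hj
    have := (pvRank_iff hs l[j] hj1).1 this
    omega

-- singleton prefix at an offset
theorem pvPref1 (l : List Char) (j : Nat) (c : Char) :
    ([c].isPrefixOf (l.drop j)) = true ↔ l[j]? = some c := by
  rw [List.isPrefixOf_iff_prefix, ← List.head?_drop]
  cases l.drop j with
  | nil => simp
  | cons x t =>
    constructor
    · intro h
      rcases h with ⟨r, hr⟩
      cases hr
      simp
    · intro h
      simp at h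
      exact ⟨t, by simp [h]⟩

-- count of a single character via count.go
theorem pvCountGo_singleton (c : Char) (l : List Char) (acc fuel : Nat) (h : l.length ≤ fuel) :
    PySem.Chars.count.go [c] fuel l acc = acc + l.count c := by
  induction l generalizing fuel acc with
  | nil => cases fuel <;> simp [PySem.Chars.count.go]
  | cons x t ih =>
    cases fuel with
    | zero => simp at h
    | succ f =>
      simp only [List.length_cons] at h
      by_cases hx : x = c
      · subst hx
        simp only [PySem.Chars.count.go]
        rw [if_pos (by simp [List.isPrefixOf])]
        have hd : List.drop ([x].length) (x :: t) = t := by simp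
        rw [hd, ih (acc+1) f (by omega)]
        rw [List.count_cons]
        simp
        omega
      · simp only [PySem.Chars.count.go]
        rw [if_neg (by simp [List.isPrefixOf]; exact fun h => hx h.symm)]
        rw [ih acc f (by omega)]
        rw [List.count_cons]
        simp [hx]

theorem pvCount_singleton (l : List Char) (c : Char) :
    PySem.Chars.count l [c] = l.count c := by
  have := pvCountGo_singleton c l 0 l.length le_rfl
  simp [PySem.Chars.count, this]

-- count as a countP over positions
theorem pvCount_pos_range (l : List Char) (c : Char) :
    l.count c = (List.range l.length).countP (fun i => l[i]? == some c) := by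
  induction l with
  | nil => simp
  | cons x t ih =>
    rw [List.length_cons, List.range_succ_eq_map, List.countP_cons, List.countP_map,
        List.count_cons, ih]
    have : ((fun i => (x :: t)[i]? == some c) ∘ Nat.succ) = fun i => t[i]? == some c := by
      funext i; simp
    rw [this]
    simp [BEq.comm]

theorem pvCount_take (cs : List Char) (s : Nat) :
    (List.take s cs).count '\n' = (pvNL cs).countP (fun i => decide (i < s)) := by
  rw [pvCount_pos_range]
  unfold pvNL
  rw [List.countP_filter]
  have hmin : (List.take s cs).length = min s cs.length := by simp
  rw [hmin]
  have hsplit : cs.length = min s cs.length + (cs.length - min s cs.length) := by omega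
  conv_rhs => rw [hsplit, List.range_add, List.countP_append, List.countP_map]
  have h2 : (List.range (cs.length - min s cs.length)).countP
      ((fun a => decide (a < s) && (cs[a]? == some '\n')) ∘ fun x => min s cs.length + x) = 0 := by
    apply List.countP_eq_zero.2
    intro a ha
    simp at ha ⊢
    intro hlt
    omega
  rw [h2]
  have h1 : ∀ i ∈ List.range (min s cs.length),
      ((List.take s cs)[i]? == some '\n') = (decide (i < s) && (cs[i]? == some '\n')) := by
    intro i hi
    simp at hi
    rw [List.getElem?_take]
    simp [show i < s by omega]
  rw [List.countP_congr (fun a ha => by rw [h1 a ha])]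
  omega

-- rfind.go: bounded greatest-match search
theorem pvRfindGo_neg (s sub : List Char) (fuel : Nat)
    (h : ∀ j ≤ fuel, ¬ sub.isPrefixOf (s.drop j) = true) :
    PySem.Chars.rfind.go s sub fuel = -1 := by
  induction fuel with
  | zero => simp [PySem.Chars.rfind.go]; simpa using h 0 le_rfl
  | succ f ih =>
    simp only [PySem.Chars.rfind.go]
    rw [if_neg (h (f+1) le_rfl)]
    exact ih (fun j hj => h j (by omega))

theorem pvRfindGo_pos (s sub : List Char) (fuel j : Nat) (hj : j ≤ fuel)
    (hpref : sub.isPrefixOf (s.drop j) = true)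
    (hmax : ∀ i, j < i → i ≤ fuel → ¬ sub.isPrefixOf (s.drop i) = true) :
    PySem.Chars.rfind.go s sub fuel = (j : Int) := by
  induction fuel with
  | zero =>
    have : j = 0 := by omega
    subst this
    simp only [PySem.Chars.rfind.go]
    rw [if_pos (by simpa using hpref)]
    simp
  | succ f ih =>
    by_cases hje : j = f + 1
    · subst hje
      simp only [PySem.Chars.rfind.go]
      rw [if_pos hpref]
    · simp only [PySem.Chars.rfind.go]
      rw [if_neg (hmax (f+1) (by omega) le_rfl)]
      exact ih (by omega) (fun i hi hif => hmax i hi (by omega))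

-- abbreviation for the rank of e among newline positions
def pvRank (cs : List Char) (e : Nat) : Nat := (pvNL cs).countP (fun i => decide (i < e))

-- the greatest-newline-below-e spec of Python's content.rfind('\n', 0, e) for 0 ≤ e ≤ len
theorem pvPrev_spec (cs : List Char) (e : Nat) (he : e ≤ cs.length) :
    PySem.Chars.rfindFrom cs ['\n'] 0 (some (e : Int)) =
      if pvRank cs e = 0 then (-1 : Int) else (((pvNL cs).getD (pvRank cs e - 1) 0 : Nat) : Int) := by
  have hnorm : PySem.Chars.rfindFrom cs ['\n'] 0 (some (e : Int)) =
      (if PySem.Chars.rfind (List.take e cs) ['\n'] = -1 then (-1 : Int)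
       else PySem.Chars.rfind (List.take e cs) ['\n']) := by
    simp only [PySem.Chars.rfindFrom]
    have h1 : ¬ ((cs.length : Int) < (e : Int)) := by exact_mod_cast not_lt.2 he
    have h2 : ¬ ((e : Int) < 0) := by omega
    simp only [if_neg h1, if_neg h2]
    rw [if_neg (by omega)]
    have : ((e : Int)).toNat = e := Int.toNat_natCast e
    simp [this]
  rw [hnorm]
  have hlen : (List.take e cs).length = e := by simp [he]
  by_cases hk : pvRank cs e = 0
  · have hneg : PySem.Chars.rfind (List.take e cs) ['\n'] = -1 := by
      unfold PySem.Chars.rfind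
      rw [hlen]
      apply pvRfindGo_neg
      intro j hj hpre
      rw [pvPref1] at hpre
      rw [List.getElem?_take] at hpre
      by_cases hjlt : j < e
      · rw [if_pos hjlt] at hpre
        have hmem : j ∈ pvNL cs := (pvNL_mem cs j).2 ⟨by omega, hpre⟩
        have : 0 < pvRank cs e := by
          unfold pvRank
          rw [List.countP_pos_iff]
          exact ⟨j, hmem, by simp [hjlt]⟩
        omega
      · rw [if_neg hjlt] at hpre; simp at hpre
    rw [hneg]
    simp [hk]
  · have hkdef : pvRank cs e = List.countP (fun i => decide (i < e)) (pvNL cs) := rfl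
    have hklen : pvRank cs e ≤ (pvNL cs).length := List.countP_le_length
    have hk1 : pvRank cs e - 1 < (pvNL cs).length := by omega
    set j' : Nat := (pvNL cs)[pvRank cs e - 1]'hk1 with hj'
    have hgetD : (pvNL cs).getD (pvRank cs e - 1) 0 = j' := List.getD_eq_getElem _ _ hk1
    have hj'mem : j' ∈ pvNL cs := List.getElem_mem hk1
    have hj'nl : cs[j']? = some '\n' := ((pvNL_mem cs j').1 hj'mem).2
    have hj'lt : j' < e := by
      have := (pvRank_iff (pvNL_sorted cs) e hk1).2 (by omega)
      exact this
    have hpos : PySem.Chars.rfind (List.take e cs) ['\n'] = (j' : Int) := by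
      unfold PySem.Chars.rfind
      rw [hlen]
      apply pvRfindGo_pos _ _ _ _ (by omega)
      · rw [pvPref1, List.getElem?_take, if_pos hj'lt]
        exact hj'nl
      · intro i hi hif hpre
        rw [pvPref1, List.getElem?_take] at hpre
        by_cases hilt : i < e
        · rw [if_pos hilt] at hpre
          have himem : i ∈ pvNL cs := (pvNL_mem cs i).2 ⟨by omega, hpre⟩
          rcases List.mem_iff_getElem.1 himem with ⟨idx, hidx, hidxeq⟩
          have : idx < pvRank cs e := (pvRank_iff (pvNL_sorted cs) e hidx).1 (by omega)
          have hle : (pvNL cs)[idx] ≤ j' := by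
            by_cases hlt : idx < pvRank cs e - 1
            · exact le_of_lt (pvSorted_getElem_lt (pvNL_sorted cs) hlt hk1)
            · have : idx = pvRank cs e - 1 := by omega
              subst this
              exact le_rfl
          omega
        · rw [if_neg hilt] at hpre; simp at hpre
    rw [hpos]
    rw [if_neg (by omega)]
    rw [if_neg hk, hgetD]

theorem pvSingleton_infix (c : Char) (l : List Char) : [c] <:+: l ↔ c ∈ l := by
  constructor
  · intro h; exact h.mem (by simp)
  · intro h
    rcases List.mem_iff_getElem.1 h with ⟨i, hi, hieq⟩
    subst hieq
    exact ⟨l.take i, l.drop (i+1), by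
      rw [List.append_assoc, List.singleton_append, ← List.drop_eq_getElem_cons hi,
          List.take_append_drop]⟩

-- the least-newline-at-or-after-p spec of Python's content.find('\n', p) for 0 ≤ p ≤ len
theorem pvNext_spec (cs : List Char) (p : Nat) (hp : p ≤ cs.length) :
    PySem.Chars.findFrom cs ['\n'] (p : Int) none =
      if pvRank cs p = (pvNL cs).length then (-1 : Int)
      else (((pvNL cs).getD (pvRank cs p) 0 : Nat) : Int) := by
  have hkdef : pvRank cs p = List.countP (fun i => decide (i < p)) (pvNL cs) := rfl
  have hklen : pvRank cs p ≤ (pvNL cs).length := List.countP_le_length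
  have hnorm : PySem.Chars.findFrom cs ['\n'] (p : Int) none =
      (if PySem.Chars.find (List.drop p cs) ['\n'] = -1 then (-1 : Int)
       else (p : Int) + PySem.Chars.find (List.drop p cs) ['\n']) := by
    simp only [PySem.Chars.findFrom]
    have h2 : ¬ ((p : Int) < 0) := by omega
    simp only [if_neg h2]
    rw [if_neg (by omega)]
    have ht : ((p : Int)).toNat = p := Int.toNat_natCast p
    simp [ht]
  rw [hnorm]
  by_cases hk : pvRank cs p = (pvNL cs).length
  · have hall : ∀ a ∈ pvNL cs, a < p := by
      have h := List.countP_eq_length.1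
        (by omega : List.countP (fun i => decide (i < p)) (pvNL cs) = (pvNL cs).length)
      intro a ha
      simpa using h a ha
    have hnone : PySem.Chars.find (List.drop p cs) ['\n'] = -1 := by
      rw [PySem.Chars.find_eq_neg_one_iff, pvSingleton_infix]
      intro hmem
      rcases List.mem_iff_getElem.1 hmem with ⟨j, hj, hjeq⟩
      rw [List.getElem_drop] at hjeq
      have hlen : p + j < cs.length := by
        rw [List.length_drop] at hj
        omega
      have hmem2 : p + j ∈ pvNL cs := (pvNL_mem cs (p + j)).2 ⟨hlen, by
        rw [List.getElem?_eq_getElem hlen, hjeq]⟩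
      have := hall _ hmem2
      omega
    rw [hnone]
    simp [hk]
  · have hk1 : pvRank cs p < (pvNL cs).length := by omega
    set m : Nat := (pvNL cs)[pvRank cs p]'hk1 with hm
    have hgetD : (pvNL cs).getD (pvRank cs p) 0 = m := List.getD_eq_getElem _ _ hk1
    have hmmem : m ∈ pvNL cs := List.getElem_mem hk1
    have hmnl : cs[m]? = some '\n' := ((pvNL_mem cs m).1 hmmem).2
    have hmlt : m < cs.length := ((pvNL_mem cs m).1 hmmem).1
    have hmge : ¬ (m < p) := by
      intro hlt
      have := (pvRank_iff (pvNL_sorted cs) p hk1).1 hlt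
      omega
    have hmel : cs[m]'hmlt = '\n' := by
      have h2 : cs[m]? = some (cs[m]'hmlt) := List.getElem?_eq_getElem hmlt
      rw [h2] at hmnl
      exact Option.some.inj hmnl
    have hmem : '\n' ∈ List.drop p cs := by
      rw [List.mem_iff_getElem]
      refine ⟨m - p, by rw [List.length_drop]; omega, ?_⟩
      rw [List.getElem_drop]
      have : cs[p + (m - p)]? = some '\n' := by
        rw [show p + (m - p) = m by omega]
        exact hmnl
      rw [List.getElem?_eq_getElem (by omega)] at this
      exact Option.some.inj this
    have hfind_ne : PySem.Chars.find (List.drop p cs) ['\n'] ≠ -1 := by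
      rw [ne_eq, PySem.Chars.find_eq_neg_one_iff, pvSingleton_infix]
      simp [hmem]
    have hge : 0 ≤ PySem.Chars.find (List.drop p cs) ['\n'] := by
      have := PySem.Chars.neg_one_le_find (List.drop p cs) ['\n']
      omega
    rcases PySem.Chars.find_spec hge with ⟨hpref, hmin⟩
    set r : Nat := (PySem.Chars.find (List.drop p cs) ['\n']).toNat with hr
    have hpr : cs[p + r]? = some '\n' := by
      rcases hpref with ⟨t, ht⟩
      rw [List.drop_drop] at ht
      have h0 : (List.drop (p + r) cs)[0]? = some '\n' := by rw [← ht]; simp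
      rw [List.getElem?_drop] at h0
      simpa using h0
    have hprlen : p + r < cs.length := by
      by_contra hge2
      rw [List.getElem?_eq_none_iff.2 (by omega)] at hpr
      simp at hpr
    have hprmem : p + r ∈ pvNL cs := (pvNL_mem cs (p + r)).2 ⟨hprlen, hpr⟩
    have hm_le : m ≤ p + r := by
      rcases List.mem_iff_getElem.1 hprmem with ⟨idx, hidx, hidxeq⟩
      have hni : ¬ (idx < pvRank cs p) := by
        intro hlt2
        have := (pvRank_iff (pvNL_sorted cs) p hidx).2 (by omega)
        omega
      by_cases heq : idx = pvRank cs p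
      · have hcongr : (pvNL cs)[idx]'hidx = (pvNL cs)[pvRank cs p]'hk1 := by
          congr 1
        omega
      · have hgt : pvRank cs p < idx := by omega
        have := pvSorted_getElem_lt (pvNL_sorted cs) hgt hidx
        omega
    have hr_le : ¬ (m < p + r) := by
      intro hlt2
      apply hmin (m - p) (by omega)
      rw [← List.isPrefixOf_iff_prefix, List.drop_drop, show p + (m - p) = m by omega]
      rw [pvPref1]
      exact hmnl
    rw [if_neg hfind_ne, if_neg hk, hgetD]
    have hfr : PySem.Chars.find (List.drop p cs) ['\n'] = (r : Int) := by rw [hr]; omega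
    rw [hfr]
    omega

theorem pvClampIdx_le (n : Nat) (i : Int) : PySem.List.clampIdx n i ≤ n := by
  simp only [PySem.List.clampIdx]
  split_ifs <;> omega

-- rfind with start 0 and any stop: spec through the clamped stop
theorem pvPrev_spec' (cs : List Char) (i : Int) :
    PySem.Chars.rfindFrom cs ['\n'] 0 (some i) =
      if pvRank cs (PySem.List.clampIdx cs.length i) = 0 then (-1 : Int)
      else (((pvNL cs).getD (pvRank cs (PySem.List.clampIdx cs.length i) - 1) 0 : Nat) : Int) := by
  rw [← pvPrev_spec cs (PySem.List.clampIdx cs.length i) (pvClampIdx_le _ _)]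
  simp only [PySem.Chars.rfindFrom]
  have hE : (if (cs.length : Int) < i then (cs.length : Int)
      else if i < 0 then (if i + cs.length < 0 then 0 else i + cs.length) else i)
      = ((PySem.List.clampIdx cs.length i : Nat) : Int) := by
    simp only [PySem.List.clampIdx]
    split_ifs <;> omega
  rw [hE]
  have h2 : (if (cs.length : Int) < ((PySem.List.clampIdx cs.length i : Nat) : Int) then (cs.length : Int)
      else if ((PySem.List.clampIdx cs.length i : Nat) : Int) < 0 then
        (if ((PySem.List.clampIdx cs.length i : Nat) : Int) + cs.length < 0 then 0
         else ((PySem.List.clampIdx cs.length i : Nat) : Int) + cs.length)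
      else ((PySem.List.clampIdx cs.length i : Nat) : Int))
      = ((PySem.List.clampIdx cs.length i : Nat) : Int) := by
    have := pvClampIdx_le cs.length i
    split_ifs <;> omega
  rw [h2]

-- find from any start: spec through the clamped start
theorem pvNext_spec' (cs : List Char) (i : Int) :
    PySem.Chars.findFrom cs ['\n'] i none =
      if pvRank cs (PySem.List.clampIdx cs.length i) = (pvNL cs).length then (-1 : Int)
      else (((pvNL cs).getD (pvRank cs (PySem.List.clampIdx cs.length i)) 0 : Nat) : Int) := by
  set st : Int := if i < 0 then (if i + cs.length < 0 then 0 else i + cs.length) else i with hst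
  have hst0 : 0 ≤ st := by rw [hst]; split_ifs <;> omega
  by_cases hbig : (cs.length : Int) < st
  · have hclamp : PySem.List.clampIdx cs.length i = cs.length := by
      simp only [PySem.List.clampIdx]
      rw [hst] at hbig
      split_ifs at hbig ⊢ <;> omega
    have hfull : pvRank cs cs.length = (pvNL cs).length := by
      apply List.countP_eq_length.2
      intro a ha
      simpa using pvNL_lt_length cs ha
    simp only [PySem.Chars.findFrom, ← hst]
    rw [if_pos hbig, hclamp, hfull]
    simp
  · have hle : st ≤ (cs.length : Int) := by omega
    have hclamp : PySem.List.clampIdx cs.length i = st.toNat := by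
      simp only [PySem.List.clampIdx]
      rw [hst] at hle hst0 ⊢
      split_ifs <;> omega
    rw [hclamp, ← pvNext_spec cs st.toNat (by omega)]
    simp only [PySem.Chars.findFrom, ← hst]
    have hst' : (if (st.toNat : Int) < 0 then
        (if (st.toNat : Int) + cs.length < 0 then 0 else (st.toNat : Int) + cs.length)
        else (st.toNat : Int)) = st := by
      split_ifs <;> omega
    rw [hst']

-- rank of NL[j]+1 is j+1
theorem pvRank_succ_self {l : List Nat} (hs : l.Pairwise (· < ·)) {j : Nat} (hj : j < l.length) :
    l.countP (fun i => decide (i < l[j] + 1)) = j + 1 := by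
  have h1 : j < l.countP (fun i => decide (i < l[j] + 1)) :=
    (pvRank_iff hs (l[j] + 1) hj).1 (by omega)
  have h2 : l.countP (fun i => decide (i < l[j] + 1)) ≤ j + 1 := by
    by_contra hgt
    rw [not_le] at hgt
    have hj1 : j + 1 < l.length := by
      have := List.countP_le_length (p := fun i => decide (i < l[j] + 1)) (l := l)
      omega
    have := (pvRank_iff hs (l[j] + 1) hj1).2 (by omega)
    have := pvSorted_getElem_lt hs (show j < j + 1 by omega) hj1
    omega
  omega

theorem pvClampIdx_nat (n m : Nat) (h : m ≤ n) : PySem.List.clampIdx n (m : Int) = m := by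
  simp only [PySem.List.clampIdx]
  split_ifs <;> (try simp) <;> omega

theorem pvRank_full (cs : List Char) : pvRank cs cs.length = (pvNL cs).length := by
  apply List.countP_eq_length.2
  intro a ha
  simpa using pvNL_lt_length cs ha

theorem pvRank_getD (cs : List Char) {j : Nat} (hj : j < (pvNL cs).length) :
    pvRank cs ((pvNL cs).getD j 0) = j := by
  rw [List.getD_eq_getElem _ _ hj]
  exact pvRank_self (pvNL_sorted cs) hj

theorem pvRank_getD_succ (cs : List Char) {j : Nat} (hj : j < (pvNL cs).length) :
    pvRank cs ((pvNL cs).getD j 0 + 1) = j + 1 := by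
  rw [List.getD_eq_getElem _ _ hj]
  exact pvRank_succ_self (pvNL_sorted cs) hj

theorem pvGetD_le_length (cs : List Char) {j : Nat} (hj : j < (pvNL cs).length) :
    (pvNL cs).getD j 0 < cs.length := by
  rw [List.getD_eq_getElem _ _ hj]
  exact pvNL_lt_length cs (List.getElem_mem hj)

-- A's backward loop starting on newline number j lands on newline number j-k (floored at 0)
theorem pvBeforeLoop_at (content : String) (k : Nat) : ∀ (j : Nat), j < (pvNL content.toList).length →
    pvBeforeLoop content k (((pvNL content.toList).getD j 0 : Nat) : Int)
      = (((pvNL content.toList).getD (j - k) 0 : Nat) : Int) := by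
  induction k with
  | zero => intro j hj; simp [pvBeforeLoop]
  | succ K ih =>
    intro j hj
    show (let prev := PySem.Str.rfindFrom content "\n" 0
            (some (((pvNL content.toList).getD j 0 : Nat) : Int));
          if prev = -1 then _ else pvBeforeLoop content K prev) = _
    have hbr : PySem.Str.rfindFrom content "\n" 0
        (some (((pvNL content.toList).getD j 0 : Nat) : Int)) =
        PySem.Chars.rfindFrom content.toList ['\n'] 0
          (some (((pvNL content.toList).getD j 0 : Nat) : Int)) := rfl
    rw [hbr, pvPrev_spec' content.toList _,
        pvClampIdx_nat _ _ (le_of_lt (pvGetD_le_length content.toList hj)),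
        pvRank_getD content.toList hj]
    by_cases hz : j = 0
    · subst hz
      simp
    · rw [if_neg hz]
      have hcast : ¬ ((((pvNL content.toList).getD (j - 1) 0 : Nat) : Int) = -1) := by omega
      rw [if_neg hcast]
      rw [ih (j - 1) (by omega)]
      congr 2
      omega

-- A's forward loop from the very end stays at the end
theorem pvAfterLoop_n (content : String) (k : Nat) :
    pvAfterLoop content k ((content.toList.length : Nat) : Int)
      = ((content.toList.length : Nat) : Int) := by
  cases k with
  | zero => simp [pvAfterLoop]
  | succ K =>
    show (let next := PySem.Str.findFrom content "\n" (((content.toList.length : Nat) : Int) + 1) none;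
          if next = -1 then PySem.Str.len content else pvAfterLoop content K next) = _
    have hbr : PySem.Str.findFrom content "\n" (((content.toList.length : Nat) : Int) + 1) none =
        PySem.Chars.findFrom content.toList ['\n'] (((content.toList.length : Nat) : Int) + 1) none := rfl
    have hclamp : PySem.List.clampIdx content.toList.length ((content.toList.length : Int) + 1)
        = content.toList.length := by
      simp only [PySem.List.clampIdx]
      split_ifs <;> simp <;> omega
    rw [hbr, pvNext_spec' content.toList _, hclamp, pvRank_full, if_pos rfl]
    simp [PySem.Str.len]

-- A's forward loop from newline number j lands on newline number j+k, or the end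
theorem pvAfterLoop_at (content : String) (k : Nat) : ∀ (j : Nat), j < (pvNL content.toList).length →
    pvAfterLoop content k (((pvNL content.toList).getD j 0 : Nat) : Int)
      = (if j + k < (pvNL content.toList).length
         then (((pvNL content.toList).getD (j + k) 0 : Nat) : Int)
         else ((content.toList.length : Nat) : Int)) := by
  induction k with
  | zero => intro j hj; simp [pvAfterLoop, hj]
  | succ K ih =>
    intro j hj
    show (let next := PySem.Str.findFrom content "\n"
            ((((pvNL content.toList).getD j 0 : Nat) : Int) + 1) none;
          if next = -1 then PySem.Str.len content else pvAfterLoop content K next) = _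
    have hbr : PySem.Str.findFrom content "\n" ((((pvNL content.toList).getD j 0 : Nat) : Int) + 1) none =
        PySem.Chars.findFrom content.toList ['\n'] ((((pvNL content.toList).getD j 0 : Nat) : Int) + 1) none := rfl
    have hc1 : (((pvNL content.toList).getD j 0 : Nat) : Int) + 1
        = (((pvNL content.toList).getD j 0 + 1 : Nat) : Int) := by push_cast; ring
    have hle : (pvNL content.toList).getD j 0 + 1 ≤ content.toList.length :=
      pvGetD_le_length content.toList hj
    rw [hbr, hc1, pvNext_spec' content.toList _, pvClampIdx_nat _ _ hle,
        pvRank_getD_succ content.toList hj]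
    by_cases hend : j + 1 = (pvNL content.toList).length
    · rw [if_pos hend, if_pos rfl]
      rw [if_neg (by omega)]
      simp [PySem.Str.len]
    · rw [if_neg hend]
      have hj1 : j + 1 < (pvNL content.toList).length := by omega
      rw [if_neg (by omega : ¬ ((((pvNL content.toList).getD (j+1) 0 : Nat) : Int) = -1))]
      rw [ih (j + 1) hj1]
      have harith : j + 1 + K = j + (K + 1) := by omega
      rw [harith]

-- ===== B-side lemmas: the line decomposition =====

theorem pvSlice_to_zero {α : Type} (xs : List α) (a : Int) :
    PySem.List.slice xs (some a) (some 0) = ([] : List α) := by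
  simp only [PySem.List.slice, PySem.List.clampIdx]
  split_ifs <;> first | omega | simp

theorem pvGetD_nl (cs : List Char) {j : Nat} (hj : j < (pvNL cs).length) :
    cs[(pvNL cs).getD j 0]? = some '\n' := by
  rw [List.getD_eq_getElem _ _ hj]
  exact ((pvNL_mem cs _).1 (List.getElem_mem hj)).2

theorem pvGetD_lt (cs : List Char) {j k : Nat} (hjk : j < k) (hk : k < (pvNL cs).length) :
    (pvNL cs).getD j 0 < (pvNL cs).getD k 0 := by
  rw [List.getD_eq_getElem _ _ (lt_trans hjk hk), List.getD_eq_getElem _ _ hk]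
  exact pvSorted_getElem_lt (pvNL_sorted cs) hjk hk

-- the list of lines of cs (what Python's content.split('\n') returns, on chars)
def pvLines : List Char → List (List Char)
  | [] => [[]]
  | c :: r =>
    match pvLines r with
    | [] => [[]]
    | h :: t => if c = '\n' then [] :: h :: t else (c :: h) :: t

theorem pvLines_ne_nil (cs : List Char) : pvLines cs ≠ [] := by
  cases cs with
  | nil => simp [pvLines]
  | cons c r =>
    simp only [pvLines]
    cases pvLines r with
    | nil => simp
    | cons h t => split_ifs <;> simp

theorem pvLines_length (cs : List Char) : (pvLines cs).length = (pvNL cs).length + 1 := by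
  induction cs with
  | nil => simp [pvLines, pvNL]
  | cons c r ih =>
    rw [pvNL_cons]
    cases hpr : pvLines r with
    | nil => exact absurd hpr (pvLines_ne_nil r)
    | cons h t =>
      rw [hpr] at ih
      simp only [pvLines, hpr]
      split_ifs with hc <;> simp_all

theorem pvJoin_cons_head (c : Char) (h : List Char) (X : List (List Char)) :
    PySem.Chars.join ['\n'] ((c :: h) :: X) = c :: PySem.Chars.join ['\n'] (h :: X) := by
  cases X with
  | nil => rw [PySem.Chars.join_singleton, PySem.Chars.join_singleton]
  | cons b t => rw [PySem.Chars.join_cons_cons, PySem.Chars.join_cons_cons]; simp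

theorem pvJoin_lines (cs : List Char) : PySem.Chars.join ['\n'] (pvLines cs) = cs := by
  induction cs with
  | nil => simp [pvLines, PySem.Chars.join_singleton]
  | cons c r ih =>
    cases hpr : pvLines r with
    | nil => exact absurd hpr (pvLines_ne_nil r)
    | cons h t =>
      rw [hpr] at ih
      simp only [pvLines, hpr]
      split_ifs with hc
      · subst hc
        rw [PySem.Chars.join_cons_cons, ih]
        simp
      · rw [pvJoin_cons_head, ih]

-- PySem's splitOn with separator "\n" computes pvLines
theorem pvGo_spec (l : List Char) : ∀ (fuel : Nat) (cur : List Char) (acc : List (List Char)),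
    l.length ≤ fuel →
    PySem.Chars.splitOn.go ['\n'] fuel l cur acc
      = acc.reverse ++ (pvLines l).modifyHead (cur.reverse ++ ·) := by
  induction l with
  | nil =>
    intro fuel cur acc _
    cases fuel <;> simp [PySem.Chars.splitOn.go, pvLines, List.reverse_cons]
  | cons c rest ih =>
    intro fuel cur acc hfuel
    cases fuel with
    | zero => simp at hfuel
    | succ f =>
      cases hpr : pvLines rest with
      | nil => exact absurd hpr (pvLines_ne_nil rest)
      | cons h t =>
        simp only [List.length_cons] at hfuel
        by_cases hc : c = '\n'
        · subst hc
          simp only [PySem.Chars.splitOn.go]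
          rw [if_pos (by simp [List.isPrefixOf])]
          have hdrop : List.drop (['\n'].length) ('\n' :: rest) = rest := by simp
          rw [hdrop, ih f [] (cur.reverse :: acc) (by omega)]
          simp [pvLines, hpr]
        · simp only [PySem.Chars.splitOn.go]
          rw [if_neg (by simp [List.isPrefixOf]; exact fun h => hc h.symm)]
          rw [ih f (c :: cur) acc (by omega)]
          simp only [pvLines, hpr, if_neg hc, List.reverse_cons, List.modifyHead_cons,
            List.append_assoc, List.singleton_append]

theorem pvSplitOn_eq (cs : List Char) : PySem.Chars.splitOn cs ['\n'] = pvLines cs := by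
  unfold PySem.Chars.splitOn
  rw [pvGo_spec cs (cs.length + 1) [] [] (by omega)]
  have h : (fun x => List.reverse ([] : List Char) ++ x) = id := by
    funext x
    simp
  rw [h, List.modifyHead_id]
  simp

-- join over a split-in-two list of pieces
theorem pvJoin_append (A B : List (List Char)) (hA : A ≠ []) (hB : B ≠ []) :
    PySem.Chars.join ['\n'] (A ++ B)
      = PySem.Chars.join ['\n'] A ++ '\n' :: PySem.Chars.join ['\n'] B := by
  induction A with
  | nil => exact absurd rfl hA
  | cons a A' ih =>
    cases A' with
    | nil =>
      cases B with
      | nil => exact absurd rfl hB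
      | cons b t =>
        rw [List.singleton_append, PySem.Chars.join_cons_cons, PySem.Chars.join_singleton]
        simp
    | cons a2 A'' =>
      rw [show (a :: a2 :: A'') ++ B = a :: ((a2 :: A'') ++ B) from rfl]
      rw [show (a2 :: A'') ++ B = a2 :: (A'' ++ B) from rfl, PySem.Chars.join_cons_cons]
      rw [show a2 :: (A'' ++ B) = (a2 :: A'') ++ B from rfl, ih (by simp),
        PySem.Chars.join_cons_cons]
      simp

-- the prefix of cs up to (excluding) its (j+1)-th newline is the join of its first j+1 lines
theorem pvTake_nl (cs : List Char) : ∀ (j : Nat), j < (pvNL cs).length →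
    cs.take ((pvNL cs).getD j 0) = PySem.Chars.join ['\n'] ((pvLines cs).take (j + 1)) := by
  induction cs with
  | nil => intro j hj; simp [pvNL] at hj
  | cons c r ih =>
    intro j hj
    cases hpr : pvLines r with
    | nil => exact absurd hpr (pvLines_ne_nil r)
    | cons h t =>
      by_cases hc : c = '\n'
      · subst hc
        have hex : pvNL ('\n' :: r) = 0 :: (pvNL r).map Nat.succ := by
          rw [pvNL_cons]
          simp
        rw [hex] at hj ⊢
        cases j with
        | zero => simp [pvLines, hpr, PySem.Chars.join_singleton]
        | succ i =>
          simp only [List.length_cons, List.length_map] at hj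
          have hi : i < (pvNL r).length := by omega
          have hgd : ((0 :: (pvNL r).map Nat.succ).getD (i + 1) 0) = (pvNL r).getD i 0 + 1 := by
            simp only [List.getD]
            rw [List.getElem?_cons_succ, List.getElem?_map, List.getElem?_eq_getElem hi]
            simp
          rw [hgd, List.take_succ_cons, ih i hi, hpr]
          have hpl : pvLines ('\n' :: r) = [] :: h :: t := by
            simp [pvLines, hpr]
          rw [hpl]
          simp [List.take_succ_cons, PySem.Chars.join_cons_cons]
      · have hex : pvNL (c :: r) = (pvNL r).map Nat.succ := by
          rw [pvNL_cons]
          simp [hc]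
        rw [hex] at hj ⊢
        rw [List.length_map] at hj
        have hgd : (((pvNL r).map Nat.succ).getD j 0) = (pvNL r).getD j 0 + 1 := by
          simp only [List.getD, List.getElem?_map]
          rw [List.getElem?_eq_getElem hj]
          simp
        rw [hgd, List.take_succ_cons, ih j hj, hpr]
        have hpl : pvLines (c :: r) = (c :: h) :: t := by
          simp [pvLines, hpr, hc]
        rw [hpl, List.take_succ_cons, List.take_succ_cons, pvJoin_cons_head]

-- the suffix of cs from its (j+1)-th newline is that newline followed by the remaining lines
theorem pvDrop_nl (cs : List Char) : ∀ (j : Nat), j < (pvNL cs).length →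
    cs.drop ((pvNL cs).getD j 0) = '\n' :: PySem.Chars.join ['\n'] ((pvLines cs).drop (j + 1)) := by
  induction cs with
  | nil => intro j hj; simp [pvNL] at hj
  | cons c r ih =>
    intro j hj
    cases hpr : pvLines r with
    | nil => exact absurd hpr (pvLines_ne_nil r)
    | cons h t =>
      by_cases hc : c = '\n'
      · subst hc
        have hex : pvNL ('\n' :: r) = 0 :: (pvNL r).map Nat.succ := by
          rw [pvNL_cons]
          simp
        rw [hex] at hj ⊢
        cases j with
        | zero =>
          have hjl := pvJoin_lines r
          rw [hpr] at hjl
          simp [pvLines, hpr, hjl]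
        | succ i =>
          simp only [List.length_cons, List.length_map] at hj
          have hi : i < (pvNL r).length := by omega
          have hgd : ((0 :: (pvNL r).map Nat.succ).getD (i + 1) 0) = (pvNL r).getD i 0 + 1 := by
            simp only [List.getD]
            rw [List.getElem?_cons_succ, List.getElem?_map, List.getElem?_eq_getElem hi]
            simp
          rw [hgd, List.drop_succ_cons, ih i hi, hpr]
          have hpl : pvLines ('\n' :: r) = [] :: h :: t := by
            simp [pvLines, hpr]
          rw [hpl]
          simp [List.drop_succ_cons]
      · have hex : pvNL (c :: r) = (pvNL r).map Nat.succ := by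
          rw [pvNL_cons]
          simp [hc]
        rw [hex] at hj ⊢
        rw [List.length_map] at hj
        have hgd : (((pvNL r).map Nat.succ).getD j 0) = (pvNL r).getD j 0 + 1 := by
          simp only [List.getD, List.getElem?_map]
          rw [List.getElem?_eq_getElem hj]
          simp
        rw [hgd, List.drop_succ_cons, ih j hj, hpr]
        have hpl : pvLines (c :: r) = (c :: h) :: t := by
          simp [pvLines, hpr, hc]
        rw [hpl, List.drop_succ_cons, List.drop_succ_cons]

-- the segment of cs between its (j+1)-th and (k+1)-th newlines is the join of lines j+1..k
theorem pvSeg (cs : List Char) {j k : Nat} (hjk : j < k) (hkL : k < (pvNL cs).length) :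
    List.drop ((pvNL cs).getD j 0) (List.take ((pvNL cs).getD k 0) cs)
      = '\n' :: PySem.Chars.join ['\n'] (((pvLines cs).drop (j + 1)).take (k - j)) := by
  have hjL : j < (pvNL cs).length := lt_trans hjk hkL
  have hlsl : (pvLines cs).length = (pvNL cs).length + 1 := pvLines_length cs
  have hsplit : (pvLines cs).take (k + 1)
      = (pvLines cs).take (j + 1) ++ ((pvLines cs).drop (j + 1)).take (k - j) := by
    rw [← List.take_add]
    congr 1
    omega
  have hA : (pvLines cs).take (j + 1) ≠ [] := by
    rw [ne_eq, List.take_eq_nil_iff]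
    rintro (h0 | hnil)
    · omega
    · exact pvLines_ne_nil cs hnil
  have hB : ((pvLines cs).drop (j + 1)).take (k - j) ≠ [] := by
    rw [ne_eq, List.take_eq_nil_iff]
    rintro (h0 | hnil)
    · omega
    · rw [List.drop_eq_nil_iff] at hnil
      omega
  rw [pvTake_nl cs k hkL, hsplit, pvJoin_append _ _ hA hB, ← pvTake_nl cs j hjL]
  have hlt : (pvNL cs).getD j 0 < cs.length := pvGetD_le_length cs hjL
  have hl2 : (cs.take ((pvNL cs).getD j 0)).length = (pvNL cs).getD j 0 := by
    rw [List.length_take]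
    omega
  rw [List.drop_append_of_le_length (by omega), List.drop_take]
  simp

theorem pvStrip_cons_nl (x : List Char) : PySem.Chars.strip ('\n' :: x) = PySem.Chars.strip x := by
  have h : PySem.Chars.isspace '\n' = true := by decide
  simp [PySem.Chars.strip, PySem.Chars.lstrip, h]

theorem pvRstrip_append_nl (y : List Char) :
    PySem.Chars.rstrip (y ++ ['\n']) = PySem.Chars.rstrip y := by
  have h : PySem.Chars.isspace '\n' = true := by decide
  simp [PySem.Chars.rstrip, List.reverse_append, h]

theorem pvStrip_append_nl (x : List Char) : PySem.Chars.strip (x ++ ['\n']) = PySem.Chars.strip x := by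
  simp only [PySem.Chars.strip, PySem.Chars.lstrip]
  rw [List.dropWhile_append]
  split_ifs with he
  · have h1 : List.dropWhile PySem.Chars.isspace ['\n'] = [] := by decide
    rw [List.isEmpty_iff] at he
    rw [h1, he]
  · exact pvRstrip_append_nl _

-- Str-level unfolding of strip-of-slice and strip-of-join to the char level
theorem pvStripSlice (content : String) (a b : Option Int) :
    PySem.Str.strip (PySem.Str.slice content a b)
      = String.ofList (PySem.Chars.strip (PySem.List.slice content.toList a b)) := by
  simp [PySem.Str.strip, PySem.Str.slice, String.toList_ofList, PySem.Chars.slice_eq_listSlice]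

theorem pvStripJoin (parts : List (List Char)) :
    PySem.Str.strip (PySem.Str.join "\n" (parts.map String.ofList))
      = String.ofList (PySem.Chars.strip (PySem.Chars.join ['\n'] parts)) := by
  have hsep : "\n".toList = ['\n'] := by decide
  have hmm : List.map String.toList (parts.map String.ofList) = parts := by
    have hco : String.toList ∘ String.ofList = id := by
      funext x
      simp [String.toList_ofList]
    rw [List.map_map, hco, List.map_id]
  simp only [PySem.Str.strip, PySem.Str.join, String.toList_ofList, hsep, hmm]

-- B's line list and line indices, reduced to pvLines and pvRank
theorem pvLinesB (content : String) :
    (PySem.Str.split? content "\n").getD [] = (pvLines content.toList).map String.ofList := by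
  have hsep : "\n".toList = ['\n'] := by decide
  simp only [PySem.Str.split?, hsep]
  simp [PySem.Chars.split?, pvSplitOn_eq]

theorem pvSliceNoneSome (cs : List Char) (b : Int) :
    PySem.List.slice cs none (some b) = cs.take (PySem.List.clampIdx cs.length b) := by
  simp [PySem.List.slice]

theorem pvCountB (content : String) (i : Int) :
    PySem.Str.count (PySem.Str.slice content none (some i)) "\n"
      = pvRank content.toList (PySem.List.clampIdx content.toList.length i) := by
  have hsep : "\n".toList = ['\n'] := by decide
  simp only [PySem.Str.count, PySem.Str.slice, String.toList_ofList, hsep,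
    PySem.Chars.slice_eq_listSlice]
  rw [pvSliceNoneSome, pvCount_singleton, pvCount_take]
  rfl

-- slices of a mapped list commute with the map
theorem pvSlice_map (l : List (List Char)) (a b : Option Int) :
    PySem.List.slice (l.map String.ofList) a b = (PySem.List.slice l a b).map String.ofList := by
  rcases a with _ | av <;> rcases b with _ | bv <;>
    simp [PySem.List.slice, ← List.map_drop, ← List.map_take]

theorem pvMain (content : String) (sp ep cl : Int) (hcl : 0 ≤ cl) :
    get_context_struct content sp ep cl = get_context_struct_alt content sp ep cl := by
  have hlenS : PySem.Str.len content = ((content.toList.length : Nat) : Int) := rfl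
  have hb1 : PySem.Str.rfindFrom content "\n" 0 (some sp)
      = PySem.Chars.rfindFrom content.toList ['\n'] 0 (some sp) := rfl
  have hb2 : PySem.Str.findFrom content "\n" ep none
      = PySem.Chars.findFrom content.toList ['\n'] ep none := rfl
  simp only [get_context_struct, get_context_struct_alt]
  rw [pvLinesB, pvCountB content sp, pvCountB content ep, hb1, hb2,
    pvPrev_spec', pvNext_spec', hlenS]
  simp only [pvSlice_map, pvStripSlice, pvStripJoin]
  have hlsl : (pvLines content.toList).length = (pvNL content.toList).length + 1 :=
    pvLines_length content.toList
  set L := (pvNL content.toList).length with hL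
  set r := pvRank content.toList (PySem.List.clampIdx content.toList.length sp) with hr
  set e := pvRank content.toList (PySem.List.clampIdx content.toList.length ep) with he
  have hrL : r ≤ L := List.countP_le_length
  have heL : e ≤ L := List.countP_le_length
  refine Prod.ext ?_ ?_
  · -- BEFORE component
    dsimp only
    apply congrArg
    by_cases hr0 : r = 0
    · rw [if_pos hr0, hr0]
      norm_num
      rw [pvSlice_to_zero, pvSlice_to_zero, PySem.Chars.join_nil]
    · have hr1L : r - 1 < L := by omega
      have hgl : (pvNL content.toList).getD (r - 1) 0 < content.toList.length :=
        pvGetD_le_length content.toList hr1L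
      rw [if_neg hr0]
      rw [if_neg (by omega : ¬ ((((pvNL content.toList).getD (r - 1) 0 : Nat) : Int) + 1 = 0))]
      have hc1 : (((pvNL content.toList).getD (r - 1) 0 : Nat) : Int) + 1
          = (((pvNL content.toList).getD (r - 1) 0 + 1 : Nat) : Int) := by push_cast; ring
      have hb3 : PySem.Str.rfindFrom content "\n" 0
            (some (((pvNL content.toList).getD (r - 1) 0 + 1 : Nat) : Int))
          = PySem.Chars.rfindFrom content.toList ['\n'] 0
            (some (((pvNL content.toList).getD (r - 1) 0 + 1 : Nat) : Int)) := rfl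
      rw [hc1, hb3, pvPrev_spec content.toList _ (by omega), pvRank_getD_succ content.toList hr1L,
        show r - 1 + 1 = r from by omega, if_neg hr0]
      rw [pvBeforeLoop_at content (cl - 1).toNat (r - 1) hr1L]
      set jA := r - 1 - (cl - 1).toNat with hjA
      rw [if_neg (by omega : ¬ ((((pvNL content.toList).getD jA 0 : Nat) : Int) = -1))]
      rw [PySem.List.slice_natCast,
        PySem.List.slice_toNat _
          (show (0:Int) ≤ max 1 ((r : Nat) - cl + 1) by omega)
          (show (0:Int) ≤ ((r : Nat) : Int) by omega)]
      rw [Int.toNat_natCast]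
      by_cases hje : jA = r - 1
      · -- empty before-window on both sides
        have hm0 : r - (max 1 ((r : Nat) - cl + 1)).toNat = 0 := by
          simp only [hjA] at hje; omega
        rw [hje, hm0, List.take_zero, PySem.Chars.join_nil]
        rw [show (pvNL content.toList).getD (r-1) 0 + 1 - (pvNL content.toList).getD (r-1) 0 = 1
          from by omega]
        rw [pvDrop_nl content.toList (r - 1) hr1L, List.take_succ_cons, List.take_zero]
        decide
      · have hja_lt : jA < r - 1 := by
          have hle : jA ≤ r - 1 := by simp only [hjA]; omega
          omega
        have hm : (max 1 ((r : Nat) - cl + 1)).toNat = jA + 1 := by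
          simp only [hjA] at hje ⊢; omega
        have hlt : (pvNL content.toList).getD jA 0 < (pvNL content.toList).getD (r - 1) 0 :=
          pvGetD_lt content.toList hja_lt hr1L
        rw [hm, ← List.drop_take]
        have hgetel : content.toList[(pvNL content.toList).getD (r - 1) 0]'hgl = '\n' := by
          have h2 := pvGetD_nl content.toList hr1L
          rw [List.getElem?_eq_getElem hgl] at h2
          exact Option.some.inj h2
        rw [List.take_succ_eq_append_getElem hgl, hgetel,
          List.drop_append_of_le_length (by rw [List.length_take]; omega),
          pvSeg content.toList hja_lt hr1L]
        rw [show ('\n' :: PySem.Chars.join ['\n']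
              (((pvLines content.toList).drop (jA + 1)).take (r - 1 - jA))) ++ ['\n']
            = '\n' :: (PySem.Chars.join ['\n']
              (((pvLines content.toList).drop (jA + 1)).take (r - 1 - jA)) ++ ['\n'])
          from rfl]
        rw [pvStrip_cons_nl, pvStrip_append_nl,
          show r - (jA + 1) = r - 1 - jA from by omega]
  · -- AFTER component
    dsimp only
    apply congrArg
    by_cases heL' : e = L
    · rw [if_pos heL', if_pos rfl]
      rw [pvAfterLoop_n content cl.toNat]
      rw [PySem.List.slice_natCast,
        PySem.List.slice_toNat _
          (show (0:Int) ≤ ((e : Nat) : Int) + 1 by omega)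
          (show (0:Int) ≤ ((e : Nat) : Int) + 1 + cl by omega)]
      rw [show content.toList.length - content.toList.length = 0 from by omega, List.take_zero]
      rw [show (((e : Nat) : Int) + 1).toNat = e + 1 from by omega, heL',
        List.drop_eq_nil_of_le (by omega), List.take_nil, PySem.Chars.join_nil]
    · have heL2 : e < L := by omega
      rw [if_neg heL',
        if_neg (by omega : ¬ ((((pvNL content.toList).getD e 0 : Nat) : Int) = -1))]
      rw [pvAfterLoop_at content cl.toNat e heL2]
      rw [PySem.List.slice_toNat _
          (show (0:Int) ≤ ((e : Nat) : Int) + 1 by omega)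
          (show (0:Int) ≤ ((e : Nat) : Int) + 1 + cl by omega)]
      rw [show (((e : Nat) : Int) + 1).toNat = e + 1 from by omega,
        show (((e : Nat) : Int) + 1 + cl).toNat = e + 1 + cl.toNat from by omega,
        show e + 1 + cl.toNat - (e + 1) = cl.toNat from by omega]
      by_cases hcl0 : cl.toNat = 0
      · rw [hcl0, if_pos (by omega : e + 0 < L)]
        rw [PySem.List.slice_natCast,
          show (pvNL content.toList).getD (e + 0) 0 - (pvNL content.toList).getD e 0 = 0
            from by rw [Nat.add_zero]; omega,
          List.take_zero, List.take_zero, PySem.Chars.join_nil]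
      · by_cases hfit : e + cl.toNat < L
        · rw [if_pos hfit]
          rw [PySem.List.slice_natCast, ← List.drop_take,
            pvSeg content.toList (by omega : e < e + cl.toNat) hfit,
            show e + cl.toNat - e = cl.toNat from by omega, pvStrip_cons_nl]
        · rw [if_neg hfit]
          rw [PySem.List.slice_natCast,
            List.take_of_length_le (by rw [List.length_drop]),
            pvDrop_nl content.toList e heL2, pvStrip_cons_nl,
            List.take_of_length_le (by rw [List.length_drop, hlsl]; omega)]

-- ===== VERDICT (by name: the statement is the Claim_ definition above) =====
theorem get_context_struct_spec : Claim_equal_get_context_struct := by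
  intro content start_pos end_pos context_lines _ hpre
  unfold Spec_get_context_struct
  exact pvMain content start_pos end_pos context_lines hpre
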